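-- pv_equiv track=rewrite | github.com/Kamuyu-N/DL-Trading-Bot | main.py | loss_counter
-- ===== SOURCE A (Python) =====
-- def loss_counter(ytrue, ypred):
--     # should only focus if its a buy or a sell
--     counter = 0
--     max_counter = 0
--
--     for pred_index, true in enumerate(ytrue):
--         if ypred[pred_index] == 2: continue  # if prediction was no trade no loss needs to be counted
--         if ypred[pred_index] != true:
--             counter += 1
--             max_counter = max(max_counter, counter)
--
--         else:
--             counter = 0
--
--     return max_counter
-- ===== SOURCE B (Python) =====
-- def loss_counter(ytrue, ypred):
--     # flags[i] = loss-flag for each traded prediction (ypred[i] != 2), indexed directly so a short ypred still raises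
--     flags = [ypred[i] != true for i, true in enumerate(ytrue) if ypred[i] != 2]
--     best = 0
--     while flags:
--         head = flags[0]
--         k = 1
--         while k < len(flags) and flags[k] == head:
--             k += 1
--         if head:
--             best = max(best, k)
--         flags = flags[k:]
--     return best
-- ===== Notes on version B (the rewrite author's own statement) =====
-- stated objective: alternative
-- what changed: Instead of one stateful loop carrying counter/max_counter, B first builds the list of loss-flags for traded predictions, then scans it group by group (maximal runs of equal flags) and takes the longest True run.
import Mathlib
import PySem

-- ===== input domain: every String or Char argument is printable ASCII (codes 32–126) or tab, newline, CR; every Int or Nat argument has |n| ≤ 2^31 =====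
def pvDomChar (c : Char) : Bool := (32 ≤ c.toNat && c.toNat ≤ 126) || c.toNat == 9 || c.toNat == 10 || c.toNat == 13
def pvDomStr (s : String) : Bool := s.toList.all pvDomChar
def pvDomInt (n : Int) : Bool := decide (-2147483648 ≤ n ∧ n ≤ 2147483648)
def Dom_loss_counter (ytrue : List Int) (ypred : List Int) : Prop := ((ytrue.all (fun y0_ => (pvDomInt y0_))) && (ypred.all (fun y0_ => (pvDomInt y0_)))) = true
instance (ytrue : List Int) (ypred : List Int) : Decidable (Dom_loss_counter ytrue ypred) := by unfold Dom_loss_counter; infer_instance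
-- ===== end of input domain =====

-- B replaces A's stateful counter loop by building the loss-flag list for traded predictions and scanning its maximal runs (alternative decomposition, same cost).


-- ===== PORT A =====
-- A's loop over enumerate(ytrue); state (counter, max_counter); none = IndexError from ypred[pred_index]
def lossLoopA (ytrue : List Int) (ypred : List Int) (i : Nat) (counter max_counter : Int) :
    Option (Int × Int) :=
  match ytrue with
  | [] => some (counter, max_counter)
  | t :: rest =>
    match PySem.List.pyGet? ypred (i : Int) with
    | none => none
    | some p =>
      if p = 2 then lossLoopA rest ypred (i + 1) counter max_counter
      else if p ≠ t then lossLoopA rest ypred (i + 1) (counter + 1) (max max_counter (counter + 1))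
      else lossLoopA rest ypred (i + 1) 0 max_counter

def loss_counter (ytrue : List Int) (ypred : List Int) : Int :=
  ((lossLoopA ytrue ypred 0 0 0).map Prod.snd).getD 0

-- ===== PORT B =====
-- B's comprehension: loss-flags of the traded predictions; none = IndexError from ypred[i]
def lossFlagsB (ytrue : List Int) (ypred : List Int) (i : Nat) : Option (List Bool) :=
  match ytrue with
  | [] => some []
  | t :: rest =>
    match PySem.List.pyGet? ypred (i : Int) with
    | none => none
    | some p =>
      if p ≠ 2 then (lossFlagsB rest ypred (i + 1)).map (fun l => (decide (p ≠ t)) :: l)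
      else lossFlagsB rest ypred (i + 1)

-- B's group scan: strip one maximal run of equal flags at a time, keep the best True-run length
def lossScanB (flags : List Bool) (best : Int) : Int :=
  match flags with
  | [] => best
  | h :: t =>
    let k : Int := 1 + (t.takeWhile (· == h)).length
    lossScanB (t.dropWhile (· == h)) (if h then max best k else best)
termination_by flags.length
decreasing_by simp [List.length_cons]; exact List.length_dropWhile_le _ _

def loss_counter_alt (ytrue : List Int) (ypred : List Int) : Int :=
  ((lossFlagsB ytrue ypred 0).map (fun fs => lossScanB fs 0)).getD 0

-- ===== PRECONDITION & SPEC =====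
-- Pre_ excludes exactly the inputs where both Pythons raise IndexError: ypred shorter than ytrue.
def Pre_loss_counter (ytrue : List Int) (ypred : List Int) : Prop :=
  ytrue.length ≤ ypred.length
instance (ytrue : List Int) (ypred : List Int) : Decidable (Pre_loss_counter ytrue ypred) := by
  unfold Pre_loss_counter; infer_instance

def pvWitness_loss_counter : List Int × List Int := ([0, 1, 2], [1, 1, 2])

def Spec_loss_counter (ytrue : List Int) (ypred : List Int) (out : Int) : Prop :=
  out = loss_counter_alt ytrue ypred
instance (ytrue : List Int) (ypred : List Int) (out : Int) : Decidable (Spec_loss_counter ytrue ypred out) := by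
  unfold Spec_loss_counter; infer_instance

-- ===== CLAIM (what is proved, stated in full; the proofs are below) =====
def Claim_equal_loss_counter : Prop := ∀ (ytrue : List Int) (ypred : List Int), Dom_loss_counter ytrue ypred → Pre_loss_counter ytrue ypred → Spec_loss_counter ytrue ypred (loss_counter ytrue ypred)

-- ===== LEMMAS AND PROOFS =====

-- A's loop restricted to the kept flags
def foldFlagsA (fs : List Bool) (c m : Int) : Int × Int :=
  match fs with
  | [] => (c, m)
  | f :: t => if f then foldFlagsA t (c + 1) (max m (c + 1)) else foldFlagsA t 0 m

-- length of the leading run of True flags / rest after it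
def leadTrue : List Bool → Nat
  | true :: t => 1 + leadTrue t
  | _ => 0

def dropLeadTrue : List Bool → List Bool
  | true :: t => dropLeadTrue t
  | fs => fs

lemma lossLoopA_eq_flags (ypred : List Int) :
    ∀ (ytrue : List Int) (i : Nat) (c m : Int),
      lossLoopA ytrue ypred i c m = (lossFlagsB ytrue ypred i).map (fun fs => foldFlagsA fs c m) := by
  intro ytrue
  induction ytrue with
  | nil => intro i c m; simp [lossLoopA, lossFlagsB, foldFlagsA]
  | cons t rest ih =>
    intro i c m
    simp only [lossLoopA, lossFlagsB]
    cases PySem.List.pyGet? ypred (i : Int) with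
    | none => simp
    | some p =>
      by_cases h2 : p = 2
      · simp [h2, ih]
      · by_cases ht : p = t
        · subst ht
          simp [h2, ih, Option.map_map, Function.comp_def, foldFlagsA]
        · simp [h2, ht, ih, Option.map_map, Function.comp_def, foldFlagsA]

lemma takeWhile_true_length : ∀ t : List Bool, (t.takeWhile (· == true)).length = leadTrue t
  | [] => by simp [leadTrue]
  | false :: t => by
      rw [List.takeWhile_cons_of_neg (by decide)]; simp [leadTrue]
  | true :: t => by
      rw [List.takeWhile_cons_of_pos (by decide), List.length_cons, takeWhile_true_length t]
      simp [leadTrue, Nat.add_comm]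

lemma dropWhile_true_eq : ∀ t : List Bool, t.dropWhile (· == true) = dropLeadTrue t
  | [] => by simp [dropLeadTrue]
  | false :: t => by
      rw [List.dropWhile_cons_of_neg (by decide)]; simp [dropLeadTrue]
  | true :: t => by
      rw [List.dropWhile_cons_of_pos (by decide)]
      simpa [dropLeadTrue] using dropWhile_true_eq t

lemma lossScanB_acc : ∀ (n : Nat) (fs : List Bool) (b : Int), fs.length ≤ n → 0 ≤ b →
    lossScanB fs b = max b (lossScanB fs 0) := by
  intro n
  induction n with
  | zero =>
    intro fs b hlen hb
    have h : fs = [] := by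
      cases fs with
      | nil => rfl
      | cons x xs => simp at hlen
    subst h; simp [lossScanB]; omega
  | succ n ih =>
    intro fs b hlen hb
    cases fs with
    | nil => simp [lossScanB]; omega
    | cons h t =>
      have hd : (t.dropWhile (· == h)).length ≤ n := by
        have := t.length_dropWhile_le (· == h)
        simp at hlen; omega
      cases h with
      | false =>
        simp only [lossScanB, Bool.false_eq_true, if_false]
        rw [ih _ _ hd hb]
      | true =>
        simp only [lossScanB, if_true]
        rw [ih _ _ hd (by omega)]
        conv_rhs => rw [ih _ _ hd (by positivity)]
        have : (0:Int) ≤ ((t.takeWhile (· == true)).length : Int) := by positivity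
        omega

lemma lossScanB_nonneg : ∀ (n : Nat) (fs : List Bool) (b : Int), fs.length ≤ n → 0 ≤ b →
    0 ≤ lossScanB fs b := by
  intro n
  induction n with
  | zero =>
    intro fs b hlen hb
    have h : fs = [] := by
      cases fs with
      | nil => rfl
      | cons x xs => simp at hlen
    subst h; simpa [lossScanB]
  | succ n ih =>
    intro fs b hlen hb
    cases fs with
    | nil => simpa [lossScanB]
    | cons h t =>
      have hd : (t.dropWhile (· == h)).length ≤ n := by
        have := t.length_dropWhile_le (· == h)
        simp at hlen; omega
      cases h with
      | false =>
        simp only [lossScanB, Bool.false_eq_true, if_false]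
        exact ih _ _ hd hb
      | true =>
        simp only [lossScanB, if_true]
        exact ih _ _ hd (by omega)

lemma lossScanB_false_cons : ∀ t : List Bool, lossScanB (false :: t) 0 = lossScanB t 0 := by
  intro t
  simp only [lossScanB, Bool.false_eq_true, if_false]
  cases t with
  | nil => simp
  | cons x xs =>
    cases x with
    | true => rw [List.dropWhile_cons_of_neg (by decide)]
    | false =>
      rw [List.dropWhile_cons_of_pos (by decide)]
      conv_rhs => rw [lossScanB]
      simp only [Bool.false_eq_true, if_false]

lemma lossScanB_decomp : ∀ fs : List Bool,
    lossScanB fs 0 = max (leadTrue fs : Int) (lossScanB (dropLeadTrue fs) 0) := by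
  intro fs
  cases fs with
  | nil => simp [lossScanB, leadTrue, dropLeadTrue]
  | cons h t =>
    cases h with
    | false =>
      have hnn := lossScanB_nonneg (false :: t).length (false :: t) 0 le_rfl le_rfl
      simp only [leadTrue, dropLeadTrue]
      omega
    | true =>
      simp only [lossScanB, if_true, leadTrue, dropLeadTrue]
      rw [takeWhile_true_length, dropWhile_true_eq,
        lossScanB_acc (dropLeadTrue t).length _ _ le_rfl (by positivity)]
      have : (0:Int) ≤ (leadTrue t : Int) := by positivity
      push_cast
      omega

lemma foldFlagsA_snd : ∀ (fs : List Bool) (c m : Int), 0 ≤ c → c ≤ m →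
    (foldFlagsA fs c m).2 = max m (max (c + (leadTrue fs : Int)) (lossScanB (dropLeadTrue fs) 0)) := by
  intro fs
  induction fs with
  | nil =>
    intro c m hc hcm
    simp [foldFlagsA, leadTrue, dropLeadTrue, lossScanB]
    omega
  | cons h t ih =>
    intro c m hc hcm
    cases h with
    | false =>
      simp only [foldFlagsA, Bool.false_eq_true, if_false]
      rw [ih 0 m le_rfl (le_trans hc hcm)]
      have h1 : lossScanB (dropLeadTrue (false :: t)) 0 = lossScanB t 0 := by
        show lossScanB (false :: t) 0 = lossScanB t 0
        exact lossScanB_false_cons t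
      have h2 := lossScanB_decomp t
      simp only [leadTrue, h1]
      omega
    | true =>
      simp only [foldFlagsA, if_true]
      rw [ih (c + 1) (max m (c + 1)) (by omega) (by omega)]
      simp only [leadTrue, dropLeadTrue]
      have : (0:Int) ≤ (leadTrue t : Int) := by positivity
      push_cast
      omega

-- ===== VERDICT (by name: the statement is the Claim_ definition above) =====
theorem loss_counter_spec : Claim_equal_loss_counter := by
  intro ytrue ypred _ _
  unfold Spec_loss_counter loss_counter loss_counter_alt
  rw [lossLoopA_eq_flags]
  cases hf : lossFlagsB ytrue ypred 0 with
  | none => simp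
  | some fs =>
    simp only [Option.map_some, Option.getD_some]
    rw [foldFlagsA_snd fs 0 0 le_rfl le_rfl]
    have h1 := lossScanB_nonneg (dropLeadTrue fs).length (dropLeadTrue fs) 0 le_rfl le_rfl
    have h2 := lossScanB_decomp fs
    have : (0:Int) ≤ (leadTrue fs : Int) := by positivity
    omega
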